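-- pv_equiv track=rewrite | github.com/wan-catherine/Leetcode | problems/N1577_Number_Of_Ways_Where_Square_Of_Number_Is_Equal_To_Product_Of_Two_Numbers.py | helper
-- ===== SOURCE A (Python) =====
-- import collections
--
-- def helper(n, nums):
--     d_nums = collections.defaultdict(int)
--     count = 0
--     for i in nums:
--         if not n % i:
--             count += d_nums[n//i]
--             d_nums[i] += 1
--     return count
-- ===== SOURCE B (Python) =====
-- import collections
--
-- def helper(n, nums):
--     cnt = collections.Counter(nums)
--     t = 0
--     for x in nums:
--         if n % x == 0:
--             w = n // x
--             t += cnt[w]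
--             if w == x:
--                 t -= 1
--     return t // 2
-- ===== Notes on version B (the rewrite author's own statement) =====
-- stated objective: alternative
-- what changed: A counts each pair once online against a running dict of earlier divisor occurrences; B first builds a full Counter of the list, then totals ordered partners cnt[n//x] per element (minus self-matches) and halves the total.
import Mathlib
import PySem

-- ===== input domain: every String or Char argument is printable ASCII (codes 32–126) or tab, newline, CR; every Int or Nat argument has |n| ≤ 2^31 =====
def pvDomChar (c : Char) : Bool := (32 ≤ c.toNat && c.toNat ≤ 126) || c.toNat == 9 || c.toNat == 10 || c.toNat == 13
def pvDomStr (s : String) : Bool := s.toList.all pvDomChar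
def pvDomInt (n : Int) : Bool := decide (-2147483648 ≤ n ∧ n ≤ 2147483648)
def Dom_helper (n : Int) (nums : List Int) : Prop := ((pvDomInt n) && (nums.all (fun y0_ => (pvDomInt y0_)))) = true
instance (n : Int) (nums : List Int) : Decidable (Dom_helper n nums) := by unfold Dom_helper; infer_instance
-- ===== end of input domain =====

-- B replaces A's online dict of earlier divisor occurrences by a Counter built up front:
-- it totals ordered partners cnt[n//x] per element (minus self-matches) and halves the total.

-- ===== PORT A =====
-- the 'for i in nums' loop carrying d_nums and count (count += d_nums[n//i] reads d BEFORE d[i] += 1)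
def helperLoop (n : Int) (d : PySem.Dict Int Int) (count : Int) : List Int → Int
  | [] => count
  | i :: l =>
    if PySem.Int.mod n i = 0 then
      helperLoop n (d.insert i (d.getD i 0 + 1)) (count + d.getD (PySem.Int.floordiv n i) 0) l
    else
      helperLoop n d count l

def helper (n : Int) (nums : List Int) : Int := helperLoop n PySem.Dict.empty 0 nums

-- ===== PORT B =====
-- the 'for x in nums' loop: t += cnt[n // x]; if n // x == x: t -= 1
def altLoop (n : Int) (cnt : PySem.Dict Int Int) (t : Int) : List Int → Int
  | [] => t
  | x :: l =>
    if PySem.Int.mod n x = 0 then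
      altLoop n cnt
        (if PySem.Int.floordiv n x = x then t + cnt.getD (PySem.Int.floordiv n x) 0 - 1
         else t + cnt.getD (PySem.Int.floordiv n x) 0) l
    else altLoop n cnt t l

-- cnt = Counter(nums); run the loop from t = 0; finally t // 2
def helper_alt (n : Int) (nums : List Int) : Int :=
  PySem.Int.floordiv (altLoop n (PySem.Dict.counter nums) 0 nums) 2

-- ===== PRECONDITION & SPEC =====
-- Pre_ excludes exactly the inputs containing 0, on which A (and B) raise ZeroDivisionError at 'n % x'.
def Pre_helper (n : Int) (nums : List Int) : Prop := (0 : Int) ∉ nums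
instance (n : Int) (nums : List Int) : Decidable (Pre_helper n nums) := by unfold Pre_helper; infer_instance
def pvWitness_helper : Int × List Int := (12, [2, 6, 3, 4])

def Spec_helper (n : Int) (nums : List Int) (out : Int) : Prop := out = helper_alt n nums
instance (n : Int) (nums : List Int) (out : Int) : Decidable (Spec_helper n nums out) := by unfold Spec_helper; infer_instance

-- ===== CLAIM (what is proved, stated in full; the proofs are below) =====
def Claim_equal_helper : Prop := ∀ (n : Int) (nums : List Int), Dom_helper n nums → Pre_helper n nums → Spec_helper n nums (helper n nums)

-- ===== LEMMAS AND PROOFS =====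

-- how many elements y of l have x * y = n
def countLater (n x : Int) : List Int → Int
  | [] => 0
  | y :: l => (if x * y = n then 1 else 0) + countLater n x l

-- number of unordered index pairs i < j with nums[i] * nums[j] = n (the common reference value)
def pairCount (n : Int) : List Int → Int
  | [] => 0
  | x :: rest => countLater n x rest + pairCount n rest

-- non-tail-recursive form of A's loop body
def Fgo (n : Int) (d : PySem.Dict Int Int) : List Int → Int
  | [] => 0
  | x :: l =>
    if PySem.Int.mod n x = 0 then
      d.getD (PySem.Int.floordiv n x) 0 + Fgo n (d.insert x (d.getD x 0 + 1)) l
    else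
      Fgo n d l

-- how many elements z of l satisfy A's match condition against value y
def tallyQ (n y : Int) : List Int → Int
  | [] => 0
  | z :: l => (if PySem.Int.mod n z = 0 ∧ PySem.Int.floordiv n z = y then 1 else 0) + tallyQ n y l

-- non-tail-recursive form of B's loop body (cnt fixed)
def gsum (n : Int) (cnt : PySem.Dict Int Int) : List Int → Int
  | [] => 0
  | x :: l =>
    (if PySem.Int.mod n x = 0 then
      cnt.getD (PySem.Int.floordiv n x) 0 - (if PySem.Int.floordiv n x = x then 1 else 0)
    else 0) + gsum n cnt l

-- Σ_{x ∈ first list} countLater n x (second list)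
def sumMatch (n : Int) : List Int → List Int → Int
  | [], _ => 0
  | x :: r, full => countLater n x full + sumMatch n r full

-- Σ_{x ∈ l} [x * x = n]
def sumSelf (n : Int) : List Int → Int
  | [] => 0
  | x :: r => (if x * x = n then 1 else 0) + sumSelf n r

lemma helperLoop_eq_Fgo (n : Int) (l : List Int) : ∀ (d : PySem.Dict Int Int) (c : Int),
    helperLoop n d c l = c + Fgo n d l := by
  induction l with
  | nil => intro d c; simp [helperLoop, Fgo]
  | cons x l ih =>
    intro d c
    simp only [helperLoop, Fgo]
    split_ifs with h
    · rw [ih]; ring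
    · rw [ih]

lemma Fgo_insert (n : Int) (l : List Int) : ∀ (d : PySem.Dict Int Int) (y : Int),
    Fgo n (d.insert y (d.getD y 0 + 1)) l = Fgo n d l + tallyQ n y l := by
  induction l with
  | nil => intro d y; simp [Fgo, tallyQ]
  | cons x l ih =>
    intro d y
    simp only [Fgo, tallyQ]
    by_cases h : PySem.Int.mod n x = 0
    · rw [if_pos h, if_pos h, ih, ih, ih, PySem.Dict.getD_insert]
      by_cases hq : PySem.Int.floordiv n x = y
      · rw [if_pos hq, if_pos ⟨h, hq⟩, hq]; ring
      · rw [if_neg hq, if_neg (fun c => hq c.2)]; ring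
    · have hc : ¬(PySem.Int.mod n x = 0 ∧ PySem.Int.floordiv n x = y) := fun c => h c.1
      rw [if_neg h, if_neg h, if_neg hc, ih]
      ring

-- A's match condition against a nonzero z is exactly "the product is n"
lemma cond_iff (n y z : Int) (hz : z ≠ 0) :
    (PySem.Int.mod n z = 0 ∧ PySem.Int.floordiv n z = y) ↔ y * z = n := by
  constructor
  · rintro ⟨h1, h2⟩
    have := PySem.Int.floordiv_mul_add_mod n z
    rw [h1, h2] at this
    linarith
  · intro h
    have hdvd : z ∣ n := ⟨y, by linarith [mul_comm y z]⟩
    have h1 : PySem.Int.mod n z = 0 := (PySem.Int.mod_eq_zero_iff_dvd n z).mpr hdvd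
    refine ⟨h1, ?_⟩
    have := PySem.Int.floordiv_mul_add_mod n z
    rw [h1] at this
    have : (PySem.Int.floordiv n z - y) * z = 0 := by
      have hn : PySem.Int.floordiv n z * z = n := by linarith
      rw [sub_mul, hn, h]; ring
    rcases mul_eq_zero.mp this with h' | h'
    · linarith
    · exact absurd h' hz

lemma tallyQ_eq_countLater (n x : Int) (l : List Int) (hl : ∀ z ∈ l, z ≠ 0) :
    tallyQ n x l = countLater n x l := by
  induction l with
  | nil => rfl
  | cons z l ih =>
    have hz : z ≠ 0 := hl z (by simp)
    simp only [tallyQ, countLater]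
    rw [ih (fun w hw => hl w (by simp [hw]))]
    congr 1
    by_cases h : x * z = n
    · simp [h, (cond_iff n x z hz).mpr h]
    · have : ¬ (PySem.Int.mod n z = 0 ∧ PySem.Int.floordiv n z = x) := fun hc => h ((cond_iff n x z hz).mp hc)
      simp [h, this]

lemma countLater_of_not_dvd (n x : Int) (l : List Int) (hx : PySem.Int.mod n x ≠ 0) :
    countLater n x l = 0 := by
  induction l with
  | nil => rfl
  | cons z l ih =>
    simp only [countLater, ih]
    have : x * z ≠ n := by
      intro h
      exact hx ((PySem.Int.mod_eq_zero_iff_dvd n x).mpr ⟨z, h.symm⟩)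
    simp [this]

lemma Fgo_empty_eq_pairCount (n : Int) (l : List Int) (hl : ∀ z ∈ l, z ≠ 0) :
    Fgo n PySem.Dict.empty l = pairCount n l := by
  induction l with
  | nil => rfl
  | cons x l ih =>
    have hl' : ∀ z ∈ l, z ≠ 0 := fun z hz => hl z (by simp [hz])
    simp only [Fgo, pairCount]
    split_ifs with h
    · rw [Fgo_insert, PySem.Dict.getD_empty, ih hl', tallyQ_eq_countLater n x l hl']
      ring
    · rw [ih hl', countLater_of_not_dvd n x l h]
      ring

-- ===== B side =====

lemma altLoop_eq_gsum (n : Int) (cnt : PySem.Dict Int Int) (l : List Int) : ∀ (t : Int),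
    altLoop n cnt t l = t + gsum n cnt l := by
  induction l with
  | nil => intro t; simp [altLoop, gsum]
  | cons x l ih =>
    intro t
    simp only [altLoop, gsum]
    split_ifs with h hw
    · rw [ih]; ring
    · rw [ih]; ring
    · rw [ih]; ring

-- a full-list count of w = n // x is the count of partners of x, for nonzero x dividing n
lemma count_eq_countLater (n x : Int) (full : List Int) (hx : x ≠ 0)
    (h : PySem.Int.mod n x = 0) :
    ((full.count (PySem.Int.floordiv n x) : Nat) : Int) = countLater n x full := by
  have hxn : x * PySem.Int.floordiv n x = n := by
    have := PySem.Int.floordiv_mul_add_mod n x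
    rw [h] at this
    linarith [mul_comm x (PySem.Int.floordiv n x)]
  induction full with
  | nil => rfl
  | cons y l ih =>
    have hiff : (y = PySem.Int.floordiv n x) ↔ x * y = n := by
      constructor
      · rintro rfl; exact hxn
      · intro hp
        have : x * (y - PySem.Int.floordiv n x) = 0 := by rw [mul_sub, hp, hxn]; ring
        rcases mul_eq_zero.mp this with h' | h'
        · exact absurd h' hx
        · linarith
    rw [List.count_cons]
    push_cast
    rw [ih]
    simp only [countLater, beq_iff_eq, hiff]
    ring

lemma selfhit_iff (n x : Int) (hx : x ≠ 0) (h : PySem.Int.mod n x = 0) :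
    (PySem.Int.floordiv n x = x) ↔ x * x = n := by
  have := cond_iff n x x hx
  constructor
  · intro hw; exact this.mp ⟨h, hw⟩
  · intro hp; exact (this.mpr hp).2

lemma gsum_counter (n : Int) (full : List Int) (l : List Int) (hl : ∀ z ∈ l, z ≠ 0) :
    gsum n (PySem.Dict.counter full) l = sumMatch n l full - sumSelf n l := by
  induction l with
  | nil => simp [gsum, sumMatch, sumSelf]
  | cons x l ih =>
    have hx : x ≠ 0 := hl x (by simp)
    simp only [gsum, sumMatch, sumSelf]
    rw [ih (fun w hw => hl w (by simp [hw]))]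
    by_cases h : PySem.Int.mod n x = 0
    · rw [if_pos h, PySem.Dict.getD_counter, count_eq_countLater n x full hx h]
      by_cases hs : x * x = n
      · rw [if_pos ((selfhit_iff n x hx h).mpr hs), if_pos hs]; ring
      · rw [if_neg (fun c => hs ((selfhit_iff n x hx h).mp c)), if_neg hs]; ring
    · have hs : x * x ≠ n := fun c =>
        h ((PySem.Int.mod_eq_zero_iff_dvd n x).mpr ⟨x, c.symm⟩)
      rw [if_neg h, countLater_of_not_dvd n x full h, if_neg hs]
      ring

-- Σ_{y ∈ r} countLater n y (x :: full) picks up one extra hit per partner of x in r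
lemma sumMatch_cons_right (n x : Int) (r full : List Int) :
    sumMatch n r (x :: full) = countLater n x r + sumMatch n r full := by
  induction r with
  | nil => simp [sumMatch, countLater]
  | cons y r ih =>
    simp only [sumMatch, countLater, ih]
    have : (y * x = n) ↔ (x * y = n) := by rw [mul_comm]
    by_cases h : x * y = n
    · rw [if_pos (this.mpr h), if_pos h]; ring
    · rw [if_neg (fun c => h (this.mp c)), if_neg h]; ring

-- the double-counting identity: ordered matches minus self-matches = 2 · (unordered pairs)
lemma double_count (n : Int) (l : List Int) :
    sumMatch n l l - sumSelf n l = 2 * pairCount n l := by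
  induction l with
  | nil => simp [sumMatch, sumSelf, pairCount]
  | cons x r ih =>
    simp only [sumMatch, sumSelf, pairCount, countLater]
    rw [sumMatch_cons_right]
    split_ifs with h <;> linarith [ih]

lemma helper_alt_eq_pairCount (n : Int) (nums : List Int) (hl : ∀ z ∈ nums, z ≠ 0) :
    helper_alt n nums = pairCount n nums := by
  unfold helper_alt
  rw [altLoop_eq_gsum, gsum_counter n nums nums hl, double_count, zero_add,
    PySem.Int.floordiv_eq_ediv_of_pos (by norm_num : (0:Int) < 2)]
  exact Int.mul_ediv_cancel_left _ (by norm_num)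

-- ===== VERDICT (by name: the statement is the Claim_ definition above) =====
theorem helper_spec : Claim_equal_helper := by
  intro n nums _ hpre
  have hl : ∀ z ∈ nums, z ≠ 0 := fun z hz h0 => hpre (h0 ▸ hz)
  unfold Spec_helper helper
  rw [helperLoop_eq_Fgo, Fgo_empty_eq_pairCount n nums hl, helper_alt_eq_pairCount n nums hl]
  ring
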